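-- pv_equiv track=rewrite | github.com/connor-git-yaml/OctoAgent | octoagent/packages/skills/src/octoagent/skills/compactor.py | _get_protected_indices
-- ===== SOURCE A (Python) =====
-- from typing import Any, Callable, Protocol
--
-- def _is_system_prompt(msg: dict[str, Any]) -> bool:
--     """判断是否是 system prompt。"""
--     return str(msg.get("role", "")).lower() == "system"
--
-- def _get_protected_indices(history: list[dict[str, Any]]) -> set[int]:
--     """获取受保护的消息索引（system prompt + 最近一轮 user/assistant）。"""
--     protected: set[int] = set()
--
--     # 保护 system prompt
--     if history and _is_system_prompt(history[0]):
--         protected.add(0)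
--
--     # 保护最近一轮 user/assistant（从后往前找）
--     found_assistant = False
--     found_user = False
--     for i in range(len(history) - 1, -1, -1):
--         msg = history[i]
--         role = str(msg.get("role", "")).lower()
--
--         # 跳过 tool 消息：在最近一轮内（已找到 assistant 但还没找到 user）也保护
--         if role == "tool":
--             if found_assistant and not found_user:
--                 protected.add(i)
--             continue
--
--         if role == "assistant" and not found_assistant:
--             protected.add(i)
--             found_assistant = True
--             continue
--
--         if role == "user" and found_assistant and not found_user:
--             protected.add(i)
--             found_user = True
--             break
--
--         # 最近一轮已完整，停止
--         if found_assistant and found_user: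
--             break
--
--     # 如果还没找到 assistant，至少保护最后一条消息
--     if not found_assistant and history:
--         protected.add(len(history) - 1)
--
--     return protected
-- ===== SOURCE B (Python) =====
-- def _get_protected_indices(history):
--     """Forward single pass: record all tool indices, the last user, and a
--     (last assistant, user-before-it) snapshot; then select protected tools
--     by a range filter instead of A's backward flagged scan."""
--     roles = [str(m.get("role", "")).lower() for m in history]
--     protected = set()
--     if roles and roles[0] == "system":
--         protected.add(0)
--     tools = []        # every tool index, ascending
--     last_user = None  # most recent user index so far
--     snap = None       # (assistant index, last_user at that moment)
--     for i, r in enumerate(roles):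
--         if r == "user":
--             last_user = i
--         elif r == "tool":
--             tools.append(i)
--         elif r == "assistant":
--             snap = (i, last_user)
--     if snap is None:
--         if roles:
--             protected.add(len(roles) - 1)
--         return protected
--     a, u = snap
--     protected.add(a)
--     for t in reversed(tools):
--         if t < a and (u is None or u < t):
--             protected.add(t)
--     if u is not None:
--         protected.add(u)
--     return protected
-- ===== Notes on version B (the rewrite author's own statement) =====
-- stated objective: alternative
-- what changed: Replaces A's backward state-machine scan with found_assistant/found_user flags by one forward pass that records all tool indices, the last user and a (last assistant, user-before-it) snapshot, then selects the protected tools by a range filter u < t < a.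
import Mathlib
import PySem

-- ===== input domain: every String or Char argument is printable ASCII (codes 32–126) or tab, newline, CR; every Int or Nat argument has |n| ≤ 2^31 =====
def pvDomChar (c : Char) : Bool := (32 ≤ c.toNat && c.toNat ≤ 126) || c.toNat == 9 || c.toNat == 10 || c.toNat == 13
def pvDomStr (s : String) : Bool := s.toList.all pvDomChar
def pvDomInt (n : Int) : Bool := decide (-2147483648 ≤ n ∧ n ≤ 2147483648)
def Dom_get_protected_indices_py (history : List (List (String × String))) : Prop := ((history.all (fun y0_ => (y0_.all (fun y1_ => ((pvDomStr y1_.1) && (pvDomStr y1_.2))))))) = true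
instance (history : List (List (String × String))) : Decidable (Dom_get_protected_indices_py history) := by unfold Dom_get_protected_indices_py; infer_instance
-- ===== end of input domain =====

-- B replaces A's backward flagged state machine by a single forward pass (all tool
-- indices, last user, last-assistant snapshot) plus a range filter (objective: alternative decomposition, same cost).

-- ===== PORT A =====
-- str(msg.get("role", "")).lower()  (dict = assoc list, first-match lookup; str() is identity on str)
def pvRole (msg : List (String × String)) : String :=
  PySem.Str.lower ((msg.lookup "role").getD "")

-- _is_system_prompt
def pvIsSystemPrompt (msg : List (String × String)) : Bool :=
  pvRole msg == "system"

-- the 'for i in range(len(history)-1,-1,-1)' loop of A, with its two flags; every i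
-- produced by the range is a valid index, so history[i] is pyGetD (exact there).
def pvLoopA (hist : List (List (String × String))) :
    List Int → PySem.Set Int → Bool → Bool → PySem.Set Int × Bool
  | [], s, fa, _ => (s, fa)
  | i :: rest, s, fa, fu =>
    let msg := PySem.List.pyGetD hist i []
    let role := pvRole msg
    if role == "tool" then
      pvLoopA hist rest (if fa && !fu then PySem.Set.add s i else s) fa fu
    else if role == "assistant" && !fa then
      pvLoopA hist rest (PySem.Set.add s i) true fu
    else if role == "user" && fa && !fu then
      (PySem.Set.add s i, fa)                              -- break
    else if fa && fu then
      (s, fa)                                              -- break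
    else
      pvLoopA hist rest s fa fu

def get_protected_indices_py (history : List (List (String × String))) : List Int :=
  let prot : PySem.Set Int := PySem.Set.empty
  let prot := if !history.isEmpty && pvIsSystemPrompt (PySem.List.pyGetD history 0 []) then
      PySem.Set.add prot 0
    else prot
  let res := pvLoopA history (PySem.List.pyRange (PySem.List.len history - 1) (-1) (-1)) prot false false
  if !res.2 && !history.isEmpty then PySem.Set.add res.1 (PySem.List.len history - 1) else res.1

-- ===== PORT B =====
-- the 'for i, r in enumerate(roles)' forward pass; state = (tools, last_user, snap)
def pvScanB (i : Int) :
    List String → List Int × Option Int × Option (Int × Option Int) →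
    List Int × Option Int × Option (Int × Option Int)
  | [], st => st
  | r :: rest, st =>
    pvScanB (i + 1) rest
      (if r == "user" then (st.1, some i, st.2.2)
       else if r == "tool" then (st.1 ++ [i], st.2.1, st.2.2)
       else if r == "assistant" then (st.1, st.2.1, some (i, st.2.1))
       else st)

-- 'u is None or u < t'
def pvUlt (u : Option Int) (t : Int) : Bool :=
  match u with
  | none => true
  | some uu => decide (uu < t)

def get_protected_indices_py_alt (history : List (List (String × String))) : List Int :=
  let roles := history.map pvRole
  let prot : PySem.Set Int := PySem.Set.empty
  let prot := if !roles.isEmpty && PySem.List.pyGetD roles 0 "" == "system" then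
      PySem.Set.add prot 0
    else prot
  let st := pvScanB 0 roles ([], none, none)
  match st.2.2 with
  | none => if !roles.isEmpty then PySem.Set.add prot (PySem.List.len roles - 1) else prot
  | some (a, u) =>
    let prot := PySem.Set.add prot a
    let prot := st.1.reverse.foldl
      (fun s t => if decide (t < a) && pvUlt u t then PySem.Set.add s t else s) prot
    match u with
    | some uu => PySem.Set.add prot uu
    | none => prot

-- ===== PRECONDITION & SPEC =====
def Spec_get_protected_indices_py (history : List (List (String × String))) (out : List Int) : Prop := out = get_protected_indices_py_alt history
instance (history : List (List (String × String))) (out : List Int) : Decidable (Spec_get_protected_indices_py history out) := by unfold Spec_get_protected_indices_py; infer_instance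

-- ===== CLAIM (what is proved, stated in full; the proofs are below) =====
def Claim_equal_get_protected_indices_py : Prop := ∀ (history : List (List (String × String))), Dom_get_protected_indices_py history → Spec_get_protected_indices_py history (get_protected_indices_py history)

-- ===== LEMMAS AND PROOFS =====

-- B's roles[i] is A's role of history[i]  (pvRole [] = "" makes the defaults line up)
lemma pvRoles_get (history : List (List (String × String))) (i : Int) :
    PySem.List.pyGetD (history.map pvRole) i "" = pvRole (PySem.List.pyGetD history i []) := by
  have h : pvRole ([] : List (String × String)) = "" := rfl
  rw [← h, PySem.List.pyGetD_map]

-- A's loop in the found_assistant ∧ ¬found_user state: a plain tool/user scan.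
def pvLoopT (roles : List String) : List Int → PySem.Set Int → PySem.Set Int
  | [], s => s
  | i :: rest, s =>
    if PySem.List.pyGetD roles i "" == "tool" then
      pvLoopT roles rest (PySem.Set.add s i)
    else if PySem.List.pyGetD roles i "" == "user" then
      PySem.Set.add s i                                     -- break
    else
      pvLoopT roles rest s

-- backward search for the last assistant (characterisation of A's loop, phase 1)
def pvFindA (roles : List String) : List Int → Option Int
  | [] => none
  | i :: rest =>
    if PySem.List.pyGetD roles i "" == "assistant" then some i
    else pvFindA roles rest

-- Phase 1, fueled form: with both flags False, A's loop skips every non-assistant index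
-- and hands over to the assistant-found state at the first (i.e. last) assistant.
lemma pvLoopA_search_aux (history : List (List (String × String))) :
    ∀ (k : Nat) (m : Int), m < (k : Int) → ∀ (s : PySem.Set Int),
    pvLoopA history (PySem.List.pyRange m (-1) (-1)) s false false =
      match pvFindA (history.map pvRole) (PySem.List.pyRange m (-1) (-1)) with
      | none => (s, false)
      | some a => pvLoopA history (PySem.List.pyRange (a - 1) (-1) (-1)) (PySem.Set.add s a) true false := by
  intro k
  induction k with
  | zero =>
    intro m hm s
    rw [PySem.List.pyRange_neg_one_eq_nil (by omega)]
    rfl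
  | succ k ih =>
    intro m hm s
    by_cases hneg : m < 0
    · rw [PySem.List.pyRange_neg_one_eq_nil (by omega)]
      rfl
    · rw [PySem.List.pyRange_neg_one_cons (by omega)]
      simp only [pvLoopA, pvFindA, pvRoles_get]
      by_cases ha : pvRole (PySem.List.pyGetD history m []) == "assistant"
      · have ha' : pvRole (PySem.List.pyGetD history m []) = "assistant" := by
          simpa using ha
        simp [ha']
      · by_cases ht : pvRole (PySem.List.pyGetD history m []) == "tool"
        · simp [ht, ha, ih (m - 1) (by omega) s]
        · by_cases hu : pvRole (PySem.List.pyGetD history m []) == "user"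
          · simp [ht, ha, hu, ih (m - 1) (by omega) s]
          · simp [ht, ha, hu, ih (m - 1) (by omega) s]

lemma pvLoopA_search (history : List (List (String × String))) (m : Int) (s : PySem.Set Int) :
    pvLoopA history (PySem.List.pyRange m (-1) (-1)) s false false =
      match pvFindA (history.map pvRole) (PySem.List.pyRange m (-1) (-1)) with
      | none => (s, false)
      | some a => pvLoopA history (PySem.List.pyRange (a - 1) (-1) (-1)) (PySem.Set.add s a) true false :=
  pvLoopA_search_aux history (m.toNat + 1) m (by omega) s

-- Phase 2: with found_assistant = True, found_user = False, A's loop is the tool/user scan.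
lemma pvLoopA_scan (history : List (List (String × String))) (L : List Int) (s : PySem.Set Int) :
    pvLoopA history L s true false = (pvLoopT (history.map pvRole) L s, true) := by
  induction L generalizing s with
  | nil => rfl
  | cons i rest ih =>
    simp only [pvLoopA, pvLoopT, pvRoles_get]
    by_cases ht : pvRole (PySem.List.pyGetD history i []) == "tool"
    · simp [ht, ih]
    · by_cases hu : pvRole (PySem.List.pyGetD history i []) == "user"
      · have hna : (pvRole (PySem.List.pyGetD history i []) == "assistant") = false := by
          simp_all
        simp [ht, hu, hna]
      · simp [ht, hu, ih]

-- ---- reference functions for B's forward pass ----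

-- ascending tool indices of rs, counting from i
def toolsF (i : Int) : List String → List Int
  | [] => []
  | r :: rest => if r == "tool" then i :: toolsF (i + 1) rest else toolsF (i + 1) rest

-- last user index of rs, counting from i
def luF (i : Int) : List String → Option Int
  | [] => none
  | r :: rest =>
    match luF (i + 1) rest with
    | some x => some x
    | none => if r == "user" then some i else none

-- last assistant index paired with the last user seen strictly before it (l0 = user carried in)
def snapF (i : Int) (l0 : Option Int) : List String → Option (Int × Option Int)
  | [] => none
  | r :: rest =>
    if r == "user" then snapF (i + 1) (some i) rest
    else if r == "assistant" then
      match snapF (i + 1) l0 rest with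
      | some x => some x
      | none => some (i, l0)
    else snapF (i + 1) l0 rest

lemma pvScanB_eq (rs : List String) : ∀ (i : Int) (t0 : List Int) (l0 : Option Int) (s0 : Option (Int × Option Int)),
    pvScanB i rs (t0, l0, s0) =
      (t0 ++ toolsF i rs,
       (match luF i rs with | some x => some x | none => l0),
       (match snapF i l0 rs with | some x => some x | none => s0)) := by
  induction rs with
  | nil => intro i t0 l0 s0; simp [pvScanB, toolsF, luF, snapF]
  | cons r rest ih =>
    intro i t0 l0 s0
    simp only [pvScanB, toolsF, luF, snapF]
    by_cases hu : r == "user"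
    · have h1 : r = "user" := by simpa using hu
      subst h1
      simp only [ih]
      rcases hl : luF (i + 1) rest with _ | x <;> rcases hs : snapF (i + 1) (some i) rest with _ | y <;> simp [hl, hs]
    · by_cases ht : r == "tool"
      · have h1 : r = "tool" := by simpa using ht
        subst h1
        simp only [ih]
        rcases hl : luF (i + 1) rest with _ | x <;> rcases hs : snapF (i + 1) l0 rest with _ | y <;> simp [hl, hs]
      · by_cases ha : r == "assistant"
        · have h1 : r = "assistant" := by simpa using ha
          subst h1
          simp only [ih]
          rcases hl : luF (i + 1) rest with _ | x <;> rcases hs : snapF (i + 1) l0 rest with _ | y <;> simp [hl, hs]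
        · simp only [hu, ht, ha, if_false, ih]
          rcases hl : luF (i + 1) rest with _ | x <;> rcases hs : snapF (i + 1) l0 rest with _ | y <;> simp [hl, hs]

lemma luF_bound (rs : List String) : ∀ (i x : Int), luF i rs = some x → i ≤ x ∧ x < i + rs.length := by
  induction rs with
  | nil => intro i x h; simp [luF] at h
  | cons r rest ih =>
    intro i x h
    simp only [luF] at h
    rcases hl : luF (i + 1) rest with _ | y <;> rw [hl] at h
    · split_ifs at h
      · have hx : i = x := by injection h
        simp only [List.length_cons]
        omega
    · have hx : y = x := by injection h
      have := ih (i + 1) y hl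
      simp only [List.length_cons]
      omega

lemma toolsF_bound (rs : List String) : ∀ (i t : Int), t ∈ toolsF i rs → i ≤ t ∧ t < i + rs.length := by
  induction rs with
  | nil => intro i t h; simp [toolsF] at h
  | cons r rest ih =>
    intro i t h
    simp only [toolsF] at h
    split_ifs at h
    · rcases List.mem_cons.1 h with h' | h'
      · subst h'
        simp only [List.length_cons]
        omega
      · have := ih (i + 1) t h'
        simp only [List.length_cons]
        omega
    · have := ih (i + 1) t h
      simp only [List.length_cons]
      omega

lemma snapF_bound (rs : List String) : ∀ (i : Int) (l0 : Option Int) (a : Int) (u : Option Int),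
    snapF i l0 rs = some (a, u) → i ≤ a ∧ a < i + rs.length := by
  induction rs with
  | nil => intro i l0 a u h; simp [snapF] at h
  | cons r rest ih =>
    intro i l0 a u h
    simp only [snapF] at h
    split_ifs at h
    · have := ih (i + 1) (some i) a u h
      simp only [List.length_cons]
      omega
    · rcases hs : snapF (i + 1) l0 rest with _ | y <;> rw [hs] at h
      · have hx : i = a := by
          have := congrArg (fun o => Option.map Prod.fst o) h
          simpa using this
        simp only [List.length_cons]
        omega
      · have hy : y = (a, u) := by injection h
        subst hy
        have := ih (i + 1) l0 a u hs
        simp only [List.length_cons]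
        omega
    · have := ih (i + 1) l0 a u h
      simp only [List.length_cons]
      omega

lemma toolsF_append (l1 l2 : List String) : ∀ (i : Int),
    toolsF i (l1 ++ l2) = toolsF i l1 ++ toolsF (i + l1.length) l2 := by
  induction l1 with
  | nil => intro i; simp [toolsF]
  | cons r rest ih =>
    intro i
    simp only [List.cons_append, toolsF, ih (i + 1)]
    split_ifs <;> simp <;> ring_nf

lemma luF_append (l1 l2 : List String) : ∀ (i : Int),
    luF i (l1 ++ l2) = (match luF (i + l1.length) l2 with | some x => some x | none => luF i l1) := by
  induction l1 with
  | nil => intro i; simp [luF]; rcases luF i l2 with _ | x <;> simp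
  | cons r rest ih =>
    intro i
    simp only [List.cons_append, luF, ih (i + 1)]
    have harith : i + 1 + (rest.length : Int) = i + (r :: rest).length := by simp; ring
    rw [harith]
    rcases luF (i + ((r :: rest).length : Int)) l2 with _ | x <;>
      rcases luF (i + 1) rest with _ | y <;> simp

lemma snapF_snoc (r : String) (l1 : List String) : ∀ (i : Int) (l0 : Option Int),
    snapF i l0 (l1 ++ [r]) =
      (if r == "assistant" then
        some (i + l1.length, (match luF i l1 with | some x => some x | none => l0))
       else snapF i l0 l1) := by
  induction l1 with
  | nil =>
    intro i l0
    by_cases ha : r == "assistant"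
    · have h1 : r = "assistant" := by simpa using ha
      subst h1
      simp [snapF, luF]
    · by_cases hu : r == "user"
      · have h1 : r = "user" := by simpa using hu
        subst h1
        simp [snapF, luF]
      · simp [snapF, luF, ha, hu]
  | cons a rest ih =>
    intro i l0
    have harith : i + 1 + (rest.length : Int) = i + ((a :: rest).length : Int) := by
      simp only [List.length_cons]
      push_cast
      ring
    by_cases hau : a == "user"
    · have h1 : a = "user" := by simpa using hau
      subst h1
      simp only [List.cons_append, snapF, luF, ih (i + 1) (some i)]
      rcases hl : luF (i + 1) rest with _ | x <;>
        split_ifs <;> simp [hl, harith]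
    · by_cases haa : a == "assistant"
      · have h1 : a = "assistant" := by simpa using haa
        subst h1
        simp only [List.cons_append, snapF, luF, ih (i + 1) l0]
        rcases hl : luF (i + 1) rest with _ | x <;>
          split_ifs <;> simp [hl, harith] <;>
          rcases hs : snapF (i + 1) l0 rest with _ | y <;> simp [hs]
      · simp only [List.cons_append, snapF, luF, ih (i + 1) l0, hau, haa, if_false]
        split_ifs <;> (try simp [harith]) <;>
          (try (rcases hl : luF (i + 1) rest with _ | x <;> simp [hl])) <;>
          simp_all

-- the snapshot's user component is the last user of the prefix before the assistant
lemma snapF_u (rs : List String) : ∀ (i : Int) (l0 : Option Int) (a : Int) (u : Option Int),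
    snapF i l0 rs = some (a, u) →
    u = (match luF i (rs.take (a - i).toNat) with | some x => some x | none => l0) := by
  induction rs with
  | nil => intro i l0 a u h; simp [snapF] at h
  | cons r rest ih =>
    intro i l0 a u h
    simp only [snapF] at h
    split_ifs at h with h1 h2
    · -- r = "user"
      have hb := snapF_bound rest (i + 1) (some i) a u h
      have hu := ih (i + 1) (some i) a u h
      have harith : a - (i + 1) = a - i - 1 := by ring
      rw [harith] at hu
      have htoN : (a - i).toNat = (a - i - 1).toNat + 1 := by omega
      have h1' : r = "user" := by simpa using h1
      subst h1'
      rw [htoN, List.take_succ_cons]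
      simp only [luF]
      rcases hl : luF (i + 1) (rest.take (a - i - 1).toNat) with _ | x <;>
        rw [hl] at hu <;> rw [hu] <;> simp
    · -- r = "assistant"
      have h2' : r = "assistant" := by simpa using h2
      subst h2'
      rcases hs : snapF (i + 1) l0 rest with _ | y <;> rw [hs] at h
      · have hx : i = a ∧ l0 = u := by simpa using h
        obtain ⟨rfl, rfl⟩ := hx
        simp [luF, show (i - i).toNat = 0 from by omega]
      · have hy : y = (a, u) := by injection h
        subst hy
        have hb := snapF_bound rest (i + 1) l0 a u hs
        have hu := ih (i + 1) l0 a u hs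
        have harith : a - (i + 1) = a - i - 1 := by ring
        rw [harith] at hu
        have htoN : (a - i).toNat = (a - i - 1).toNat + 1 := by omega
        rw [htoN, List.take_succ_cons]
        simp only [luF]
        rcases hl : luF (i + 1) (rest.take (a - i - 1).toNat) with _ | x <;>
          rw [hl] at hu <;> rw [hu] <;> simp
    · -- other role
      have hb := snapF_bound rest (i + 1) l0 a u h
      have hu := ih (i + 1) l0 a u h
      have harith : a - (i + 1) = a - i - 1 := by ring
      rw [harith] at hu
      have htoN : (a - i).toNat = (a - i - 1).toNat + 1 := by omega
      rw [htoN, List.take_succ_cons]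
      simp only [luF]
      rcases hl : luF (i + 1) (rest.take (a - i - 1).toNat) with _ | x <;>
        rw [hl] at hu <;> rw [hu] <;> simp [h1]

-- a fold whose test rejects every element is the identity
lemma foldl_no_add (a : Int) (u : Option Int) : ∀ (L : List Int) (s : PySem.Set Int),
    (∀ t ∈ L, (decide (t < a) && pvUlt u t) = false) →
    L.foldl (fun s t => if decide (t < a) && pvUlt u t then PySem.Set.add s t else s) s = s := by
  intro L
  induction L with
  | nil => intro s h; rfl
  | cons t rest ih =>
    intro s h
    simp only [List.foldl_cons, h t (List.mem_cons_self ..), if_false, Bool.false_eq_true]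
    exact ih s (fun t' ht' => h t' (List.mem_cons_of_mem _ ht'))

-- KEY: A's tool/user scan below m equals B's filtered fold over the prefix's tools
lemma pvLoopT_eq (rs : List String) : ∀ (m : Nat), m ≤ rs.length → ∀ (a : Int), (m : Int) ≤ a → ∀ (s : PySem.Set Int),
    pvLoopT rs (PySem.List.pyRange ((m : Int) - 1) (-1) (-1)) s =
      (match luF 0 (rs.take m) with
       | some uu => PySem.Set.add
          ((toolsF 0 (rs.take m)).reverse.foldl
            (fun s t => if decide (t < a) && pvUlt (luF 0 (rs.take m)) t then PySem.Set.add s t else s) s) uu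
       | none =>
          (toolsF 0 (rs.take m)).reverse.foldl
            (fun s t => if decide (t < a) && pvUlt (luF 0 (rs.take m)) t then PySem.Set.add s t else s) s) := by
  intro m
  induction m with
  | zero =>
    intro hm a ha s
    rw [show ((0 : Nat) : Int) - 1 = (-1 : Int) by norm_num,
      PySem.List.pyRange_neg_one_eq_nil (by norm_num)]
    simp [pvLoopT, toolsF, luF]
  | succ m ih =>
    intro hm a ha s
    have hmlt : m < rs.length := by omega
    have hma : ((m : Nat) : Int) < a := by push_cast at ha ⊢; omega
    have hc : ((m + 1 : Nat) : Int) - 1 = ((m : Nat) : Int) := by push_cast; ring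
    rw [hc, PySem.List.pyRange_neg_one_cons (by omega)]
    simp only [pvLoopT]
    have hget : PySem.List.pyGetD rs ((m : Nat) : Int) "" = rs[m] := by
      rw [PySem.List.pyGetD_natCast]
      simp [List.getD_eq_getElem?_getD, List.getElem?_eq_getElem hmlt]
    have htake : rs.take (m + 1) = rs.take m ++ [rs[m]] := by
      rw [List.take_add_one]
      simp [List.getElem?_eq_getElem hmlt]
    have hlen : (((rs.take m).length : Nat) : Int) = ((m : Nat) : Int) := by
      simp [List.length_take]
      omega
    rw [hget, htake, toolsF_append, luF_append, hlen]
    simp only [zero_add]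
    by_cases ht : rs[m] == "tool"
    · -- tool: protect m, continue below
      have h' : rs[m] = "tool" := by simpa using ht
      rw [h']
      have ihh := ih (by omega) a (by omega) (PySem.Set.add s ((m : Nat) : Int))
      rw [ihh]
      have htl : toolsF ((m : Nat) : Int) ["tool"] = [((m : Nat) : Int)] := by simp [toolsF]
      have hlu : luF ((m : Nat) : Int) ["tool"] = none := by simp [luF]
      rw [htl, hlu]
      rcases hl : luF 0 (rs.take m) with _ | x
      · simp only [hl]
        simp [pvUlt, hma]
      · have hx := luF_bound (rs.take m) 0 x hl
        have hxm : x < ((m : Nat) : Int) := by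
          have := hx.2
          omega
        simp only [hl]
        simp [pvUlt, hma, hxm]
    · by_cases hu : rs[m] == "user"
      · -- user: protect m and stop
        have h' : rs[m] = "user" := by simpa using hu
        rw [h']
        have htl : toolsF ((m : Nat) : Int) ["user"] = [] := by simp [toolsF]
        have hlu : luF ((m : Nat) : Int) ["user"] = some ((m : Nat) : Int) := by simp [luF]
        rw [htl, hlu]
        have hnone : ∀ t ∈ (toolsF 0 (rs.take m)).reverse,
            (decide (t < a) && pvUlt (some ((m : Nat) : Int)) t) = false := by
          intro t htm
          have := toolsF_bound (rs.take m) 0 t (List.mem_reverse.1 htm)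
          have htm' : ¬ (((m : Nat) : Int) < t) := by
            have h2 := this.2
            have h3 : ((rs.take m).length : Int) ≤ ((m : Nat) : Int) := by
              simp [List.length_take]
            omega
          simp [pvUlt, htm']
        have hfold := foldl_no_add a (some ((m : Nat) : Int)) ((toolsF 0 (rs.take m)).reverse) s hnone
        simp only [show (("user" : String) == "tool") = false from rfl,
          show (("user" : String) == "user") = true from rfl,
          Bool.false_eq_true, if_false, if_true, List.append_nil]
        rw [hfold]
      · -- any other role: skip
        have ihh := ih (by omega) a (by omega) s
        rw [if_neg (by simpa using ht), if_neg (by simpa using hu), ihh]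
        have htl : toolsF ((m : Nat) : Int) [rs[m]] = [] := by
          simp [toolsF, show (rs[m] == "tool") = false from by simpa using ht]
        have hlu : luF ((m : Nat) : Int) [rs[m]] = none := by
          simp [luF, show (rs[m] == "user") = false from by simpa using hu]
        rw [htl, hlu]
        simp

-- backward search = last assistant of the prefix
lemma pvFindA_eq (rs : List String) : ∀ (m : Nat), m ≤ rs.length →
    pvFindA rs (PySem.List.pyRange ((m : Int) - 1) (-1) (-1)) = (snapF 0 none (rs.take m)).map Prod.fst := by
  intro m
  induction m with
  | zero =>
    intro hm
    rw [show ((0 : Nat) : Int) - 1 = (-1 : Int) by norm_num,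
      PySem.List.pyRange_neg_one_eq_nil (by norm_num)]
    simp [pvFindA, snapF]
  | succ m ih =>
    intro hm
    have hmlt : m < rs.length := by omega
    have hc : ((m + 1 : Nat) : Int) - 1 = ((m : Nat) : Int) := by push_cast; ring
    rw [hc, PySem.List.pyRange_neg_one_cons (by omega)]
    simp only [pvFindA]
    have hget : PySem.List.pyGetD rs ((m : Nat) : Int) "" = rs[m] := by
      rw [PySem.List.pyGetD_natCast]
      simp [List.getD_eq_getElem?_getD, List.getElem?_eq_getElem hmlt]
    have htake : rs.take (m + 1) = rs.take m ++ [rs[m]] := by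
      rw [List.take_add_one]
      simp [List.getElem?_eq_getElem hmlt]
    have hlen : (((rs.take m).length : Nat) : Int) = ((m : Nat) : Int) := by
      simp [List.length_take]
      omega
    rw [hget, htake, snapF_snoc]
    simp only [zero_add]
    by_cases ha : rs[m] == "assistant"
    · simp [ha, List.length_take]
      omega
    · simp only [ha, Bool.false_eq_true, if_false]
      exact ih (by omega)

-- ===== VERDICT (by name: the statement is the Claim_ definition above) =====
theorem get_protected_indices_py_spec : Claim_equal_get_protected_indices_py := by
  intro history _
  unfold Spec_get_protected_indices_py get_protected_indices_py get_protected_indices_py_alt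
  simp only [PySem.List.len_eq, List.length_map, List.isEmpty_map, pvRoles_get, pvIsSystemPrompt]
  rw [pvLoopA_search, pvScanB_eq]
  have hfind := pvFindA_eq (history.map pvRole) (history.map pvRole).length (le_refl _)
  rw [List.take_length] at hfind
  simp only [List.length_map] at hfind
  rw [hfind]
  rcases hsnap : snapF 0 none (history.map pvRole) with _ | ⟨a, u⟩
  · simp [hsnap]
  · have hb := snapF_bound (history.map pvRole) 0 none a u hsnap
    have ha0 : (0 : Int) ≤ a := hb.1
    have han : a < ((history.map pvRole).length : Int) := by
      have := hb.2
      simpa using this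
    have hmn : a.toNat ≤ (history.map pvRole).length := by
      have h2 := hb.2
      omega
    have hma : ((a.toNat : Nat) : Int) = a := by omega
    have hmn' : a.toNat ≤ history.length := by simpa using hmn
    -- the snapshot's user component = last user of the prefix below a
    have hsu := snapF_u (history.map pvRole) 0 none a u hsnap
    simp only [sub_zero] at hsu
    have hu' : u = luF 0 ((history.map pvRole).take a.toNat) := by
      rcases h : luF 0 ((history.map pvRole).take a.toNat) with _ | x <;>
        rw [h] at hsu <;> simpa using hsu
    -- split the full tool list at a
    have hsplit : toolsF 0 (history.map pvRole) =
        toolsF 0 ((history.map pvRole).take a.toNat) ++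
          toolsF ((a.toNat : Nat) : Int) ((history.map pvRole).drop a.toNat) := by
      conv_lhs => rw [← List.take_append_drop a.toNat (history.map pvRole)]
      rw [toolsF_append]
      have : ((((history.map pvRole).take a.toNat).length : Nat) : Int) = ((a.toNat : Nat) : Int) := by
        simp only [List.length_take, List.length_map]
        omega
      rw [this, zero_add]
    have hloop := pvLoopT_eq (history.map pvRole) a.toNat hmn a (by omega)
    simp only [Option.map_some, pvLoopA_scan, Bool.not_true, Bool.false_and,
      Bool.false_eq_true, if_false, List.nil_append]
    rw [show a - 1 = ((a.toNat : Nat) : Int) - 1 from by omega]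
    rw [hloop, hu', hsplit, List.reverse_append, List.foldl_append]
    have hnoop : ∀ (P : PySem.Set Int),
        (toolsF ((a.toNat : Nat) : Int) ((history.map pvRole).drop a.toNat)).reverse.foldl
          (fun s t => if decide (t < a) && pvUlt (luF 0 ((history.map pvRole).take a.toNat)) t
            then PySem.Set.add s t else s) P = P := by
      intro P
      apply foldl_no_add
      intro t ht
      have htb := toolsF_bound _ _ t (List.mem_reverse.1 ht)
      have hta : ¬ (t < a) := by
        have := htb.1
        omega
      simp [hta]
    rw [hnoop]
    rfl
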